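-- pv_equiv track=rewrite | github.com/Rochelly/Rox-Iptables-Manager | firewall_libs/firewall_handler.py | split_port_10
-- ===== SOURCE A (Python) =====
-- def split_port_10(ports):
--     substrings = ports.split(",")
--     sub_lists = []
--     temp = []
--
--     for s in substrings:
--
--         temp.append(s)
--         if len(temp) == 10:
--             sub_lists.append(",".join(temp))
--             temp = []
--
--     if len(temp) > 0:
--         sub_lists.append(",".join(temp))
--     return sub_lists
-- ===== SOURCE B (Python) =====
-- def split_port_10(ports):
--     parts = ports.split(",")
--     return [",".join(parts[i:i + 10]) for i in range(0, len(parts), 10)]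
-- ===== Notes on version B (the rewrite author's own statement) =====
-- stated objective: simpler
-- what changed: Replaces the stateful accumulate-and-flush loop (running temp buffer, flush at 10, trailing flush) with stride-10 index chunking: one comprehension joining each slice parts[i:i+10].
import Mathlib
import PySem

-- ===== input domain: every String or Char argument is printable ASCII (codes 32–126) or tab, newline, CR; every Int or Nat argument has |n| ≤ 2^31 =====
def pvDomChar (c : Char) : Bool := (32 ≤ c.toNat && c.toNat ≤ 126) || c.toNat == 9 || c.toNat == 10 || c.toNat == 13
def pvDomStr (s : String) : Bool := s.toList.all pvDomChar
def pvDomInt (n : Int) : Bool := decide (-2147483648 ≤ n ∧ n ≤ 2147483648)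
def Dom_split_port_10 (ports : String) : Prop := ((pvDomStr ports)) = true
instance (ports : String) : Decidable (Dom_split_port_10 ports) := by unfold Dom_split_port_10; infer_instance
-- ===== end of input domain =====

-- B replaces A's accumulate-and-flush buffer loop with stride-10 index slicing (objective: simpler).

-- ===== PORT A =====
-- one iteration of A's for-loop: append s to temp, flush when the buffer reaches 10
def splitA_step (st : List String × List String) (s : String) : List String × List String :=
  let temp := st.2 ++ [s]
  if temp.length == 10 then (st.1 ++ [PySem.Str.join "," temp], ([] : List String))
  else (st.1, temp)

def split_port_10 (ports : String) : List String :=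
  let substrings := (PySem.Str.split? ports ",").getD []
  let st := substrings.foldl splitA_step ([], [])
  if 0 < st.2.length then st.1 ++ [PySem.Str.join "," st.2] else st.1

-- ===== PORT B =====
def split_port_10_alt (ports : String) : List String :=
  let parts := (PySem.Str.split? ports ",").getD []
  (PySem.List.pyRange 0 (parts.length : Int) 10).map
    (fun i => PySem.Str.join "," (PySem.List.slice parts (some i) (some (i + 10))))

-- ===== PRECONDITION & SPEC =====
def Spec_split_port_10 (ports : String) (out : List String) : Prop := out = split_port_10_alt ports
instance (ports : String) (out : List String) : Decidable (Spec_split_port_10 ports out) := by unfold Spec_split_port_10; infer_instance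

-- ===== CLAIM (what is proved, stated in full; the proofs are below) =====
def Claim_equal_split_port_10 : Prop := ∀ (ports : String), Dom_split_port_10 ports → Spec_split_port_10 ports (split_port_10 ports)

-- ===== LEMMAS AND PROOFS =====

-- the common value both sides compute: join each block of 10
def pvChunks (xs : List String) : List String :=
  if xs = [] then []
  else PySem.Str.join "," (xs.take 10) :: pvChunks (xs.drop 10)
termination_by xs.length
decreasing_by
  simp only [List.length_drop]
  have : xs.length ≠ 0 := by simpa [List.length_eq_zero_iff] using ‹¬ xs = []›
  omega

-- A's loop leaves the buffer untouched-but-extended while it stays under 10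
theorem pvFill (xs : List String) : ∀ temp acc : List String, temp.length + xs.length < 10 →
    xs.foldl splitA_step (acc, temp) = (acc, temp ++ xs) := by
  induction xs with
  | nil => intro temp acc h; simp
  | cons s xs ih =>
      intro temp acc h
      simp only [List.foldl_cons, splitA_step]
      have hlen : (temp ++ [s]).length ≠ 10 := by simp at h ⊢; omega
      simp only [beq_iff_eq, if_neg hlen]
      rw [ih (temp ++ [s]) acc (by simp at h ⊢; omega)]
      simp

-- when the buffer plus the remaining input make exactly 10, the loop flushes once
theorem pvFill10 (xs : List String) : ∀ temp acc : List String, xs ≠ [] →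
    temp.length + xs.length = 10 →
    xs.foldl splitA_step (acc, temp) = (acc ++ [PySem.Str.join "," (temp ++ xs)], []) := by
  induction xs with
  | nil => intro _ _ hne _; exact absurd rfl hne
  | cons s xs ih =>
      intro temp acc hne h
      simp only [List.foldl_cons, splitA_step]
      by_cases hx : xs = []
      · subst hx
        have hlen : (temp ++ [s]).length = 10 := by simp at h ⊢; omega
        simp [hlen]
      · have hlen : (temp ++ [s]).length ≠ 10 := by
          simp at h ⊢
          have : 0 < xs.length := List.length_pos_iff.mpr hx
          omega
        simp only [beq_iff_eq, if_neg hlen]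
        rw [ih (temp ++ [s]) acc hx (by simp at h ⊢; omega)]
        simp

-- A's loop + trailing flush computes pvChunks
theorem pvA_eq_chunks (n : Nat) (xs : List String) (hn : xs.length ≤ n) (acc : List String) :
    (if 0 < (xs.foldl splitA_step (acc, [])).2.length
     then (xs.foldl splitA_step (acc, [])).1 ++
          [PySem.Str.join "," (xs.foldl splitA_step (acc, [])).2]
     else (xs.foldl splitA_step (acc, [])).1) = acc ++ pvChunks xs := by
  induction n generalizing xs acc with
  | zero =>
      have : xs = [] := by
        cases xs with
        | nil => rfl
        | cons a t => simp at hn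
      subst this
      simp [pvChunks]
  | succ n ih =>
      by_cases hnil : xs = []
      · subst hnil; simp [pvChunks]
      · by_cases hlt : xs.length < 10
        · rw [pvFill xs [] acc (by simpa using hlt)]
          have hpos : 0 < xs.length := List.length_pos_iff.mpr hnil
          rw [pvChunks]
          simp only [if_neg hnil]
          have ht : xs.take 10 = xs := List.take_of_length_le (by omega)
          have hd : xs.drop 10 = [] := List.drop_eq_nil_of_le (by omega)
          simp [hpos, ht, hd, pvChunks]
        · rw [Nat.not_lt] at hlt
          have hsplit : xs = xs.take 10 ++ xs.drop 10 := (List.take_append_drop 10 xs).symm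
          have hfold : xs.foldl splitA_step (acc, []) =
              (xs.drop 10).foldl splitA_step ((xs.take 10).foldl splitA_step (acc, [])) := by
            conv_lhs => rw [hsplit]
            rw [List.foldl_append]
          have h10 : (xs.take 10).length = 10 := by simp; omega
          have hne10 : xs.take 10 ≠ [] := by
            intro h; rw [h] at h10; simp at h10
          rw [hfold, pvFill10 (xs.take 10) [] acc hne10 (by simpa using h10)]
          simp only [List.nil_append]
          rw [ih (xs.drop 10) (by simp; omega)]
          conv_rhs => rw [pvChunks]
          rw [if_neg hnil]
          simp

-- an empty step-10 range
theorem pvRange_ten_nil (b : Int) (h : b ≤ 0) : PySem.List.pyRange 0 b 10 = [] := by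
  simp only [PySem.List.pyRange]
  norm_num
  omega

-- step-10 ranges starting at 0 contain only nonnegative indices
theorem pvRange_ten_nonneg (b i : Int) (h : i ∈ PySem.List.pyRange 0 b 10) : 0 ≤ i := by
  simp only [PySem.List.pyRange] at h
  norm_num at h
  obtain ⟨k, _, hk⟩ := h
  omega

-- range(10, b, 10) is range(0, b-10, 10) shifted by 10
theorem pvRange_ten_shift (b : Int) :
    PySem.List.pyRange 10 b 10 = (PySem.List.pyRange 0 (b - 10) 10).map (· + 10) := by
  simp only [PySem.List.pyRange]
  norm_num
  by_cases h : 10 < b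
  · rw [if_pos h]
    intro a _; ring
  · rw [if_neg h]
    intro a _; ring

-- range(0, b, 10) unfolds cons-wise while 0 < b
theorem pvRange_ten_cons (b : Int) (h : 0 < b) :
    PySem.List.pyRange 0 b 10 = 0 :: PySem.List.pyRange 10 b 10 := by
  simp only [PySem.List.pyRange]
  norm_num
  rw [if_pos h]
  by_cases h10 : 10 < b
  · rw [if_pos h10]
    have hc' : ((b + 10 - 1) / 10).toNat = ((b - 1) / 10).toNat + 1 := by omega
    rw [hc', List.range_succ_eq_map]
    simp only [List.map_cons, List.map_map]
    congr 1
    apply List.map_congr_left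
    intro k _
    simp only [Function.comp_apply]
    push_cast
    ring
  · rw [if_neg h10]
    have hc : ((b + 10 - 1) / 10).toNat = 1 := by omega
    rw [hc]
    simp [List.range_succ]

-- slicing after dropping 10 = slicing 10 further along
theorem pvSlice_drop (xs : List String) (i : Int) (hi : 0 ≤ i) :
    PySem.List.slice xs (some (i + 10)) (some (i + 10 + 10)) =
      PySem.List.slice (xs.drop 10) (some i) (some (i + 10)) := by
  rw [PySem.List.slice_toNat xs (by omega) (by omega),
      PySem.List.slice_toNat (xs.drop 10) hi (by omega)]
  rw [List.drop_drop]
  congr 1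
  · omega
  · congr 1; omega

-- B's range-and-slice comprehension computes pvChunks
theorem pvB_eq_chunks (n : Nat) (xs : List String) (hn : xs.length ≤ n) :
    (PySem.List.pyRange 0 (xs.length : Int) 10).map
      (fun i => PySem.Str.join "," (PySem.List.slice xs (some i) (some (i + 10)))) =
      pvChunks xs := by
  induction n generalizing xs with
  | zero =>
      have : xs = [] := by
        cases xs with
        | nil => rfl
        | cons a t => simp at hn
      subst this
      simp [PySem.List.pyRange, pvChunks]
  | succ n ih =>
      by_cases hnil : xs = []
      · subst hnil; simp [PySem.List.pyRange, pvChunks]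
      · have hpos : (0:Int) < (xs.length : Int) := by
          have := List.length_pos_iff.mpr hnil; exact_mod_cast this
        rw [pvRange_ten_cons _ hpos, List.map_cons]
        rw [pvChunks]; simp only [if_neg hnil]
        congr 1
        · congr 1
          rw [PySem.List.slice_zero_start, PySem.List.slice_to xs (by norm_num)]
          norm_num
          congr 1
        · rw [pvRange_ten_shift, List.map_map]
          have heq : ((PySem.List.pyRange 0 ((xs.length : Int) - 10) 10).map
              ((fun i => PySem.Str.join "," (PySem.List.slice xs (some i) (some (i + 10)))) ∘ (· + 10))) =
              (PySem.List.pyRange 0 ((xs.length : Int) - 10) 10).map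
              (fun i => PySem.Str.join "," (PySem.List.slice (xs.drop 10) (some i) (some (i + 10)))) := by
            apply List.map_congr_left
            intro i hi
            have h0 : 0 ≤ i := pvRange_ten_nonneg _ _ hi
            simp only [Function.comp]
            rw [pvSlice_drop xs i h0]
          rw [heq]
          have hlen : ((xs.drop 10).length : Int) = (xs.length : Int) - 10 ∨ (xs.drop 10) = [] := by
            by_cases h10 : 10 ≤ xs.length
            · left; simp; omega
            · right; exact List.drop_eq_nil_of_le (by omega)
          rcases hlen with h | h
          · rw [← h]; exact ih (xs.drop 10) (by simp at hn ⊢; omega)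
          · have hle : xs.length ≤ 10 := by
              have h' := List.drop_eq_nil_iff.mp h
              omega
            rw [h, pvRange_ten_nil _ (by omega)]
            simp [pvChunks]

-- ===== VERDICT (by name: the statement is the Claim_ definition above) =====
theorem split_port_10_spec : Claim_equal_split_port_10 := by
  intro ports _
  unfold Spec_split_port_10 split_port_10 split_port_10_alt
  set xs := (PySem.Str.split? ports ",").getD [] with hxs
  simp only
  rw [pvA_eq_chunks xs.length xs le_rfl [], List.nil_append,
      pvB_eq_chunks xs.length xs le_rfl]
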